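-- pv_equiv track=rewrite | github.com/AsilbekT/new_tel_bot | bot/views.py | call_dynamic_menu
-- ===== SOURCE A (Python) =====
-- def call_dynamic_menu(data, user=None):
--     tem_data = []
--     single_line = []
--     num = len(data)
--     menu = []
--     if num % 2 != 0:
--         num -= 1
--         lang = data.popitem()
--         one = {'text': lang[1], 'callback_data': lang[0]}
--         tem_data.append([one])
--
--     for key, value in data.items():
--         one = {'text': value, 'callback_data': key}
--         if len(single_line) < 1:
--             single_line.append(one)
--         else:
--             single_line.append(one)
--             tem_data.append(single_line)
--             single_line = []
--     return tem_data
-- ===== SOURCE B (Python) =====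
-- def call_dynamic_menu(data, user=None):
--     menu = []
--     if len(data) % 2 != 0:
--         key, value = data.popitem()
--         menu.append([{'text': value, 'callback_data': key}])
--     items = list(data.items())
--     for (k1, v1), (k2, v2) in zip(items[::2], items[1::2]):
--         menu.append([{'text': v1, 'callback_data': k1},
--                      {'text': v2, 'callback_data': k2}])
--     return menu
-- ===== Notes on version B (the rewrite author's own statement) =====
-- stated objective: idiomatic
-- what changed: Replaces the single_line accumulator/flush loop by zipping the two strided views items[::2] and items[1::2] and emitting each pair directly as a two-button row (the odd popitem case is kept as-is).
import Mathlib
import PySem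

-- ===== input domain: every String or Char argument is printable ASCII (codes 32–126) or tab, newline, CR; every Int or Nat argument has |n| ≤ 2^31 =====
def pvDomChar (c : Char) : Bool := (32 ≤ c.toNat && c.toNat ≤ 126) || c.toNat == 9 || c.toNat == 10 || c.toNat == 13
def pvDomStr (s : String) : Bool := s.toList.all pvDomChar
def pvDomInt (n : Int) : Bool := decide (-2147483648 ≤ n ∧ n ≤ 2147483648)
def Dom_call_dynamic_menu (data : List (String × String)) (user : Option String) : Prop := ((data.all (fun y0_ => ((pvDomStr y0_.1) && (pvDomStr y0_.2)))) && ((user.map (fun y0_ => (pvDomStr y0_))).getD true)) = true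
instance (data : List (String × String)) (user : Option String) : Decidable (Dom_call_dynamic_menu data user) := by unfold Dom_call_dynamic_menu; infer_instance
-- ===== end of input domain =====

-- B replaces A's single_line accumulator/flush loop by zipping the strided views items[::2] and
-- items[1::2] into two-button rows (idiomatic, same cost). Equivalence is about the RETURN value;
-- both Pythons perform the same data.popitem() mutation on odd-sized input.


-- ===== PORT A =====
-- loop body of 'for key, value in data.items()': state = (tem_data, single_line)
def aStep (st : List (List (List (String × String))) × List (List (String × String)))
    (kv : String × String) :
    List (List (List (String × String))) × List (List (String × String)) :=
  let one := [("text", kv.2), ("callback_data", kv.1)]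
  if st.2.length < 1 then (st.1, st.2 ++ [one])
  else (st.1 ++ [st.2 ++ [one]], ([] : List (List (String × String))))

def call_dynamic_menu (data : List (String × String)) (user : Option String) :
    List (List (List (String × String))) :=
  -- if num % 2 != 0: lang = data.popitem(); tem_data.append([one])  (popitem = last item)
  let st0 :=
    if data.length % 2 ≠ 0 then
      match data.getLast? with
      | some lang => ([[[("text", lang.2), ("callback_data", lang.1)]]], data.dropLast)
      | none => ([], data)
    else ([], data)
  (st0.2.foldl aStep (st0.1, [])).1

-- ===== PORT B =====
-- hand port of the step-2 slice items[::2] (PySem.List.slice has no step): exact for step 2 from 0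
def bStride2 {α : Type} : List α → List α
  | [] => []
  | [a] => [a]
  | a :: _ :: t => a :: bStride2 t

def call_dynamic_menu_alt (data : List (String × String)) (user : Option String) :
    List (List (List (String × String))) :=
  let menu0 :=
    if data.length % 2 ≠ 0 then
      match data.getLast? with
      | some kv => [[[("text", kv.2), ("callback_data", kv.1)]]]
      | none => []
    else []
  let items := if data.length % 2 ≠ 0 then data.dropLast else data
  -- for (k1,v1),(k2,v2) in zip(items[::2], items[1::2]):  (items[1::2] = (items.tail)[::2])
  menu0 ++ ((bStride2 items).zip (bStride2 items.tail)).map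
    (fun p => [[("text", p.1.2), ("callback_data", p.1.1)],
               [("text", p.2.2), ("callback_data", p.2.1)]])

-- ===== PRECONDITION & SPEC =====
def Spec_call_dynamic_menu (data : List (String × String)) (user : Option String) (out : List (List (List (String × String)))) : Prop := out = call_dynamic_menu_alt data user
instance (data : List (String × String)) (user : Option String) (out : List (List (List (String × String)))) : Decidable (Spec_call_dynamic_menu data user out) := by unfold Spec_call_dynamic_menu; infer_instance

-- ===== CLAIM (what is proved, stated in full; the proofs are below) =====
def Claim_equal_call_dynamic_menu : Prop := ∀ (data : List (String × String)) (user : Option String), Dom_call_dynamic_menu data user → Spec_call_dynamic_menu data user (call_dynamic_menu data user)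

-- ===== LEMMAS AND PROOFS =====
theorem bStride2_cons_tail {α : Type} (b : α) (t : List α) :
    bStride2 (b :: t) = b :: bStride2 t.tail := by
  cases t <;> rfl

-- A's fold from an empty single_line emits exactly the zipped strided pairs.
theorem aFold_eq_pairs (xs : List (String × String))
    (acc : List (List (List (String × String)))) :
    (xs.foldl aStep (acc, [])).1 =
      acc ++ ((bStride2 xs).zip (bStride2 xs.tail)).map
        (fun p => [[("text", p.1.2), ("callback_data", p.1.1)],
                   [("text", p.2.2), ("callback_data", p.2.1)]]) := by
  induction xs using bStride2.induct generalizing acc with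
  | case1 => simp [bStride2]
  | case2 a => simp [aStep, bStride2]
  | case3 a b t ih =>
      have h : (a :: b :: t).foldl aStep (acc, []) =
          t.foldl aStep (acc ++ [[[("text", a.2), ("callback_data", a.1)],
            [("text", b.2), ("callback_data", b.1)]]], []) := by
        simp [List.foldl, aStep]
      rw [h, ih]
      simp [bStride2, bStride2_cons_tail]

-- ===== VERDICT (by name: the statement is the Claim_ definition above) =====
theorem call_dynamic_menu_spec : Claim_equal_call_dynamic_menu := by
  intro data user _
  show call_dynamic_menu data user = call_dynamic_menu_alt data user
  unfold call_dynamic_menu call_dynamic_menu_alt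
  by_cases h : data.length % 2 = 0
  · simp [h, aFold_eq_pairs]
  · cases hl : data.getLast? with
    | none =>
        have : data = [] := by
          cases data with
          | nil => rfl
          | cons x xs => simp at hl
        subst this; simp at h
    | some lang => simp [h, aFold_eq_pairs]
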